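-- pv_equiv track=rewrite | github.com/nchynoweth/Hangman | Hangman-Script.py | check_done
-- ===== SOURCE A (Python) =====
-- def check_done(guesss, word):
--     return_num = 0
--     check_num = 0
--     length_word = len(word)
--     for letter in word:
--         if letter in guesss:
--             check_num +=1
--     if length_word == check_num:
--         return_num = 1
--     return return_num
-- ===== SOURCE B (Python) =====
-- def check_done(guesss, word):
--     remaining = set(word)
--     for g in guesss:
--         remaining.discard(g)
--         if not remaining:
--             break
--     return 0 if remaining else 1
-- ===== Notes on version B (the rewrite author's own statement) =====
-- stated objective: faster
-- what changed: Inverts the traversal: instead of counting, per letter of word, whether it occurs in guesss, B iterates once over guesss discarding each guess from a shrinking set of the word's remaining letters and returns 1 exactly when the set empties (early break).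
import Mathlib
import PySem

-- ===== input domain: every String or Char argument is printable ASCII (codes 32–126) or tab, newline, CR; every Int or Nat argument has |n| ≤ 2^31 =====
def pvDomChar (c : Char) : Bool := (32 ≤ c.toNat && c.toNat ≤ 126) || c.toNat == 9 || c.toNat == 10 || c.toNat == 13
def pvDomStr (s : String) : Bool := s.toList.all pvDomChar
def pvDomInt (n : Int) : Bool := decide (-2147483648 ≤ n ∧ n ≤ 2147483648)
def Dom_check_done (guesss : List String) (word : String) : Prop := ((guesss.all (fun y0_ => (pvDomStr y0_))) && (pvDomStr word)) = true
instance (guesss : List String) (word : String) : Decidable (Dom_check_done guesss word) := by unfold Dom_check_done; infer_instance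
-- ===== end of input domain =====

-- B inverts the traversal: it iterates once over guesss, discarding each guess from a set of the
-- word's remaining letters (early break when empty), instead of A's per-letter membership count.
-- ===== PORT A =====
def check_done (guesss : List String) (word : String) : Int :=
  let return_num : Int := 0
  let length_word : Int := (word.toList.length : Int)
  let check_num : Int := word.toList.foldl
    (fun check_num letter =>
      if guesss.contains (String.mk [letter]) then check_num + 1 else check_num) 0
  if length_word = check_num then 1 else return_num

-- ===== PORT B =====
-- the 'for g in guesss: remaining.discard(g); if not remaining: break' loop
def cdLoop (remaining : PySem.Set String) : List String → PySem.Set String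
  | [] => remaining
  | g :: rest =>
      let r := PySem.Set.discard remaining g
      if r.isEmpty then r else cdLoop r rest

def check_done_alt (guesss : List String) (word : String) : Int :=
  let remaining : PySem.Set String := PySem.Set.ofList (word.toList.map (fun c => String.mk [c]))
  let r := cdLoop remaining guesss
  if r.isEmpty then 1 else 0

-- ===== PRECONDITION & SPEC =====
def Spec_check_done (guesss : List String) (word : String) (out : Int) : Prop := out = check_done_alt guesss word
instance (guesss : List String) (word : String) (out : Int) : Decidable (Spec_check_done guesss word out) := by unfold Spec_check_done; infer_instance

-- ===== CLAIM =====
def Claim_equal_check_done : Prop := ∀ (guesss : List String) (word : String), Dom_check_done guesss word → Spec_check_done guesss word (check_done guesss word)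

-- ===== LEMMAS AND PROOFS =====
lemma count_foldl (p : Char → Bool) (l : List Char) (acc : Int) :
    l.foldl (fun n c => if p c then n + 1 else n) acc = acc + (l.countP p : Int) := by
  induction l generalizing acc with
  | nil => simp
  | cons c t ih =>
    simp only [List.foldl_cons, List.countP_cons, ih]
    by_cases h : p c <;> simp [h] <;> push_cast <;> ring

lemma mem_cdLoop (gs : List String) (r : PySem.Set String) (x : String) :
    x ∈ cdLoop r gs ↔ x ∈ r ∧ x ∉ gs := by
  induction gs generalizing r with
  | nil => simp [cdLoop]
  | cons g rest ih =>
    simp only [cdLoop]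
    by_cases he : (PySem.Set.discard r g).isEmpty
    · simp only [he, if_true]
      rw [List.isEmpty_iff] at he
      constructor
      · intro hx; rw [he] at hx; simp at hx
      · rintro ⟨hxr, hxg⟩
        have : x ∈ PySem.Set.discard r g := by
          rw [PySem.Set.mem_discard]
          exact ⟨hxr, fun h => hxg (h ▸ List.mem_cons_self)⟩
        rw [he] at this; exact absurd this (by simp)
    · rw [Bool.not_eq_true] at he
      simp only [he, Bool.false_eq_true, if_false, ih, PySem.Set.mem_discard, List.mem_cons]
      tauto

lemma cdLoop_empty_iff (gs : List String) (r : PySem.Set String) :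
    (cdLoop r gs).isEmpty = true ↔ ∀ x ∈ r, x ∈ gs := by
  rw [List.isEmpty_iff, List.eq_nil_iff_forall_not_mem]
  constructor
  · intro h x hx
    by_contra hg
    exact h x ((mem_cdLoop gs r x).mpr ⟨hx, hg⟩)
  · intro h x hx
    obtain ⟨hxr, hxg⟩ := (mem_cdLoop gs r x).mp hx
    exact hxg (h x hxr)

-- ===== VERDICT =====
theorem check_done_spec : Claim_equal_check_done := by
  intro guesss word _
  unfold Spec_check_done check_done check_done_alt
  simp only [count_foldl, Int.zero_add]
  by_cases h : ∀ c ∈ word.toList, guesss.contains (String.mk [c])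
  · have hc : word.toList.countP (fun c => guesss.contains (String.mk [c])) = word.toList.length :=
      List.countP_eq_length.mpr h
    have he : (cdLoop (PySem.Set.ofList (word.toList.map (fun c => String.mk [c]))) guesss).isEmpty = true := by
      rw [cdLoop_empty_iff]
      intro x hx
      rw [PySem.Set.mem_ofList] at hx
      obtain ⟨c, hc', rfl⟩ := List.mem_map.mp hx
      simpa using h c hc'
    simp [he]
    simpa using hc.symm
  · have hc : word.toList.countP (fun c => guesss.contains (String.mk [c])) ≠ word.toList.length := by
      intro heq; exact h (List.countP_eq_length.mp heq)
    have he : (cdLoop (PySem.Set.ofList (word.toList.map (fun c => String.mk [c]))) guesss).isEmpty = false := by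
      rw [Bool.eq_false_iff]
      intro hemp
      apply h
      intro c hcmem
      have := (cdLoop_empty_iff _ _).mp hemp (String.mk [c])
        (by rw [PySem.Set.mem_ofList]; exact List.mem_map_of_mem hcmem)
      simpa using this
    simp only [he]
    simp
    intro heq
    exact hc (by simpa using heq.symm)
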